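-- pv_equiv track=rewrite | github.com/wannabethere/asthera | agents/app/agents/nodes/writers/enhanced_dashboard_pipeline.py | _find_sql_insert_position
-- ===== SOURCE A (Python) =====
-- def _find_sql_insert_position(sql: str) -> int:
--     """Find the position to insert WHERE conditions in SQL"""
--     sql_lower = sql.lower()
--
--     # Look for ORDER BY, GROUP BY, HAVING, LIMIT clauses
--     keywords = ["order by", "group by", "having", "limit"]
--     positions = []
--
--     for keyword in keywords:
--         pos = sql_lower.find(keyword)
--         if pos != -1:
--             positions.append(pos)
--
--     if positions:
--         return min(positions)
--     else:
--         return len(sql)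
-- ===== SOURCE B (Python) =====
-- def _find_sql_insert_position(sql: str) -> int:
--     """Find the position to insert WHERE conditions in SQL"""
--     lowered = sql.lower()
--     keywords = ("order by", "group by", "having", "limit")
--     for i in range(len(lowered)):
--         if lowered.startswith(keywords, i):
--             return i
--     return len(lowered)
-- ===== Notes on version B (the rewrite author's own statement) =====
-- stated objective: alternative
-- what changed: Replaces four independent full str.find scans collected into a list and reduced with min by a single left-to-right scan that returns the first index where the lowered string starts with any of the four keywords.
import Mathlib
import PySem

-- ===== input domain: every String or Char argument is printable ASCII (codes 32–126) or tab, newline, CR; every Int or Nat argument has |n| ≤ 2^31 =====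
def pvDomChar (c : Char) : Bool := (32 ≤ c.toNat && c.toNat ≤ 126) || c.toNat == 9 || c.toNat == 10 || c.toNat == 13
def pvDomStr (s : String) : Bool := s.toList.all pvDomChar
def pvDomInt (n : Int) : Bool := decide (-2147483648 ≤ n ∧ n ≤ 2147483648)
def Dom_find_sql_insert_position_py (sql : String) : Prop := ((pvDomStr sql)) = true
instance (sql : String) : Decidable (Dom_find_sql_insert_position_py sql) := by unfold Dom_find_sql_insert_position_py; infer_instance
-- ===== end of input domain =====

-- B replaces four independent full-string find scans reduced with min by one left-to-right scan
-- returning the first index where the lowered string starts with any clause keyword (alternative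
-- decomposition, same asymptotic cost).

-- ===== PORT A =====
def find_sql_insert_position_py (sql : String) : Int :=
  let sql_lower := PySem.Str.lower sql
  let keywords : List String := ["order by", "group by", "having", "limit"]
  let positions : List Int :=
    keywords.foldl (fun positions keyword =>
      let pos := PySem.Str.find sql_lower keyword
      if pos ≠ -1 then positions ++ [pos] else positions) []
  if positions ≠ [] then
    (PySem.List.min? positions (fun x => x)).getD 0
  else
    PySem.Str.len sql

-- ===== PORT B =====
-- the four clause keywords, lower-case, as char lists
def pvKeywords : List (List Char) :=
  ["order by".toList, "group by".toList, "having".toList, "limit".toList]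

-- the 'for i in range(len(lowered)): if lowered.startswith(keywords, i): return i' loop,
-- as structural recursion over the suffixes of the lowered string; falls through to len(lowered)
def pvScan : List Char → Int
  | [] => 0
  | c :: rest =>
    if pvKeywords.any (fun k => PySem.Chars.startswith (c :: rest) k) then 0
    else 1 + pvScan rest

def find_sql_insert_position_py_alt (sql : String) : Int :=
  pvScan (PySem.Chars.lower sql.toList)

-- ===== PRECONDITION & SPEC =====
def Spec_find_sql_insert_position_py (sql : String) (out : Int) : Prop := out = find_sql_insert_position_py_alt sql
instance (sql : String) (out : Int) : Decidable (Spec_find_sql_insert_position_py sql out) := by unfold Spec_find_sql_insert_position_py; infer_instance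

-- ===== CLAIM (what is proved, stated in full; the proofs are below) =====
def Claim_equal_find_sql_insert_position_py : Prop := ∀ (sql : String), Dom_find_sql_insert_position_py sql → Spec_find_sql_insert_position_py sql (find_sql_insert_position_py sql)

-- ===== LEMMAS AND PROOFS =====

-- the list of keyword find-positions A collects, in filter/map form
def pvPos (cs : List Char) : List Int :=
  (pvKeywords.filter (fun k => !(PySem.Chars.find cs k == -1))).map
    (fun k => PySem.Chars.find cs k)

lemma pvKeywords_ne_nil : ∀ k ∈ pvKeywords, k ≠ [] := by decide

-- find is characterised by first occurrence
lemma pv_find_uniq (s sub : List Char) (j : Nat) (hj : sub <+: s.drop j)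
    (hmin : ∀ i < j, ¬ sub <+: s.drop i) : PySem.Chars.find s sub = (j : Int) := by
  have hin : PySem.Chars.isIn sub s = true :=
    (PySem.Chars.exists_prefix_drop_iff_isIn sub s).1 ⟨j, hj⟩
  have hnn : 0 ≤ PySem.Chars.find s sub :=
    (PySem.Chars.find_nonneg_iff s sub).2 ((PySem.Chars.isIn_iff_infix sub s).1 hin)
  obtain ⟨hpre, hlt⟩ := PySem.Chars.find_spec hnn
  rcases lt_trichotomy (PySem.Chars.find s sub).toNat j with h | h | h
  · exact absurd hpre (hmin _ h)
  · omega
  · exact absurd hj (hlt _ h)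

lemma pv_find_of_prefix (s sub : List Char) (h : sub <+: s) : PySem.Chars.find s sub = 0 := by
  have := pv_find_uniq s sub 0 (by simpa using h) (by omega)
  simpa using this

lemma pv_find_nil (sub : List Char) (h : sub ≠ []) : PySem.Chars.find [] sub = -1 := by
  rw [PySem.Chars.find_eq_neg_one_iff]
  intro hinf
  exact h (List.eq_nil_of_infix_nil hinf)

lemma pv_find_cons (c : Char) (rest sub : List Char) (_hsub : sub ≠ [])
    (hnp : ¬ sub <+: (c :: rest)) :
    PySem.Chars.find (c :: rest) sub =
      if PySem.Chars.find rest sub = -1 then -1 else PySem.Chars.find rest sub + 1 := by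
  by_cases hr : PySem.Chars.find rest sub = -1
  · rw [if_pos hr, PySem.Chars.find_eq_neg_one_iff]
    intro hinf
    rcases List.infix_cons_iff.1 hinf with h | h
    · exact hnp h
    · exact (PySem.Chars.find_eq_neg_one_iff rest sub).1 hr h
  · rw [if_neg hr]
    have hnn : 0 ≤ PySem.Chars.find rest sub := by
      have := PySem.Chars.neg_one_le_find rest sub; omega
    obtain ⟨hpre, hlt⟩ := PySem.Chars.find_spec hnn
    have := pv_find_uniq (c :: rest) sub ((PySem.Chars.find rest sub).toNat + 1)
      (by simpa using hpre)
      (by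
        intro i hi
        match i with
        | 0 => simpa using hnp
        | Nat.succ i' =>
          simp only [List.drop_succ_cons]
          exact hlt i' (by omega))
    omega

-- A's foldl over the keyword strings is pvPos of the lowered char list
lemma pv_portA_eq (sql : String) :
    find_sql_insert_position_py sql =
      (if pvPos (PySem.Chars.lower sql.toList) ≠ [] then
        (PySem.List.min? (pvPos (PySem.Chars.lower sql.toList)) (fun x => x)).getD 0
      else PySem.Str.len sql) := by
  unfold find_sql_insert_position_py pvPos pvKeywords
  simp only [PySem.Str.find_eq, PySem.Str.toList_lower, List.foldl_cons, List.foldl_nil,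
    List.filter_cons, List.filter_nil]
  by_cases h1 : PySem.Chars.find (PySem.Chars.lower sql.toList) "order by".toList = -1 <;>
  by_cases h2 : PySem.Chars.find (PySem.Chars.lower sql.toList) "group by".toList = -1 <;>
  by_cases h3 : PySem.Chars.find (PySem.Chars.lower sql.toList) "having".toList = -1 <;>
  by_cases h4 : PySem.Chars.find (PySem.Chars.lower sql.toList) "limit".toList = -1 <;>
  simp_all [beq_eq_false_iff_ne]

lemma pv_mem_pvPos (cs : List Char) (x : Int) :
    x ∈ pvPos cs ↔ ∃ k ∈ pvKeywords, PySem.Chars.find cs k ≠ -1 ∧ x = PySem.Chars.find cs k := by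
  unfold pvPos
  simp only [List.mem_map, List.mem_filter, Bool.not_eq_eq_eq_not, Bool.not_true, beq_eq_false_iff_ne]
  constructor
  · rintro ⟨k, ⟨hk, hne⟩, rfl⟩; exact ⟨k, hk, hne, rfl⟩
  · rintro ⟨k, hk, hne, rfl⟩; exact ⟨k, ⟨hk, hne⟩, rfl⟩

lemma pv_pvPos_eq_nil_iff (cs : List Char) :
    pvPos cs = [] ↔ ∀ k ∈ pvKeywords, PySem.Chars.find cs k = -1 := by
  unfold pvPos
  simp [List.filter_eq_nil_iff]

lemma pv_foldl_min_map_add_one (t : List Int) (x : Int) :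
    (t.map (· + 1)).foldl min (x + 1) = t.foldl min x + 1 := by
  induction t generalizing x with
  | nil => rfl
  | cons a t ih =>
    simp only [List.map_cons, List.foldl_cons, min_add_add_right]
    exact ih (min x a)

lemma pv_min?_map_add_one (l : List Int) :
    PySem.List.min? (l.map (· + 1)) (fun y => y) = (PySem.List.min? l (fun y => y)).map (· + 1) := by
  cases l with
  | nil => simp [(PySem.List.min?_eq_none_iff ([] : List Int) (fun y => y)).2 rfl]
  | cons x t =>
    rw [List.map_cons, PySem.List.min?_id_cons, PySem.List.min?_id_cons]
    simp [pv_foldl_min_map_add_one]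

-- in the no-hit step the position list shifts by one
lemma pv_pvPos_cons (c : Char) (rest : List Char)
    (hnp : ∀ k ∈ pvKeywords, ¬ k <+: (c :: rest)) :
    pvPos (c :: rest) = (pvPos rest).map (· + 1) := by
  unfold pvPos
  rw [List.map_map]
  rw [List.filter_congr (l := pvKeywords)
    (q := fun k => !(PySem.Chars.find rest k == -1))
    (by
      intro k hk
      rw [pv_find_cons c rest k (pvKeywords_ne_nil k hk) (hnp k hk)]
      by_cases h : PySem.Chars.find rest k = -1
      · simp [h]
      · have := PySem.Chars.neg_one_le_find rest k
        simp only [if_neg h]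
        have h1 : PySem.Chars.find rest k + 1 ≠ -1 := by omega
        simp [beq_eq_false_iff_ne.2 h1, beq_eq_false_iff_ne.2 h])]
  apply List.map_congr_left
  intro k hk
  rw [List.mem_filter] at hk
  have hne : PySem.Chars.find rest k ≠ -1 := by simpa using hk.2
  simp only [Function.comp_apply]
  rw [pv_find_cons c rest k (pvKeywords_ne_nil k hk.1) (hnp k hk.1), if_neg hne]

-- the single scan equals A's filter-and-minimise result
lemma pv_scan_eq (cs : List Char) :
    pvScan cs = if pvPos cs ≠ [] then
        (PySem.List.min? (pvPos cs) (fun x => x)).getD 0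
      else (cs.length : Int) := by
  induction cs with
  | nil =>
    have : pvPos [] = [] := (pv_pvPos_eq_nil_iff []).2
      (fun k hk => pv_find_nil k (pvKeywords_ne_nil k hk))
    simp [pvScan, this]
  | cons c rest ih =>
    by_cases hhit : ∃ k ∈ pvKeywords, PySem.Chars.startswith (c :: rest) k = true
    · obtain ⟨k, hk, hsw⟩ := hhit
      have hpre : k <+: (c :: rest) := (PySem.Chars.startswith_iff _ _).1 hsw
      have hfk : PySem.Chars.find (c :: rest) k = 0 := pv_find_of_prefix _ _ hpre
      have hmem : (0 : Int) ∈ pvPos (c :: rest) :=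
        (pv_mem_pvPos _ _).2 ⟨k, hk, by simp [hfk], hfk.symm⟩
      have hne : pvPos (c :: rest) ≠ [] := by
        intro h; rw [h] at hmem; exact (List.not_mem_nil) hmem
      have hscan : pvScan (c :: rest) = 0 := by
        simp only [pvScan, if_pos (List.any_eq_true.2 ⟨k, hk, hsw⟩)]
      obtain ⟨m, hm⟩ : ∃ m, PySem.List.min? (pvPos (c :: rest)) (fun x => x) = some m := by
        cases hmo : PySem.List.min? (pvPos (c :: rest)) (fun x => x) with
        | none => exact absurd ((PySem.List.min?_eq_none_iff _ _).1 hmo) hne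
        | some m => exact ⟨m, rfl⟩
      have hle : m ≤ 0 := PySem.List.min?_isMin hm 0 hmem
      have hge : 0 ≤ m := by
        have hmmem := PySem.List.min?_mem hm
        obtain ⟨k', _, hne', rfl⟩ := (pv_mem_pvPos _ _).1 hmmem
        have := PySem.Chars.neg_one_le_find (c :: rest) k'
        omega
      rw [hscan, if_pos hne, hm]
      simp only [Option.getD_some]
      omega
    · simp only [not_exists, not_and] at hhit
      have hnp : ∀ k ∈ pvKeywords, ¬ k <+: (c :: rest) := by
        intro k hk h
        exact hhit k hk ((PySem.Chars.startswith_iff _ _).2 h)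
      have hany : pvKeywords.any (fun k => PySem.Chars.startswith (c :: rest) k) = false := by
        simp only [List.any_eq_false]
        intro k hk
        simp [hhit k hk]
      have hpos := pv_pvPos_cons c rest hnp
      have hscan : pvScan (c :: rest) = 1 + pvScan rest := by
        simp only [pvScan, hany]; simp
      rw [hscan, ih, hpos]
      by_cases hr : pvPos rest = []
      · simp [hr]; ring
      · have hne : (pvPos rest).map (· + 1) ≠ [] := by simpa using hr
        rw [if_pos hne, if_pos hr, pv_min?_map_add_one]
        obtain ⟨m, hm⟩ : ∃ m, PySem.List.min? (pvPos rest) (fun x => x) = some m := by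
          cases hmo : PySem.List.min? (pvPos rest) (fun x => x) with
          | none => exact absurd ((PySem.List.min?_eq_none_iff _ _).1 hmo) hr
          | some m => exact ⟨m, rfl⟩
        rw [hm]; simp only [Option.map_some, Option.getD_some]
        ring

lemma pv_length_lower (cs : List Char) : (PySem.Chars.lower cs).length = cs.length := by
  induction cs with
  | nil => rfl
  | cons c rest ih => simp [PySem.Chars.lower] at ih ⊢

-- ===== VERDICT (by name: the statement is the Claim_ definition above) =====
theorem find_sql_insert_position_py_spec : Claim_equal_find_sql_insert_position_py := by
  intro sql _
  unfold Spec_find_sql_insert_position_py find_sql_insert_position_py_alt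
  rw [pv_portA_eq, pv_scan_eq, pv_length_lower]
  simp [PySem.Str.len_eq]
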